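-- pv_equiv track=rewrite | github.com/lolpie244/chess | chess_pieces/get_piece_positions_info.py | get_overlap_positions
-- ===== SOURCE A (Python) =====
-- def get_overlap_positions(pos, new_pos, piece=''):
--     if piece in ['knight', 'pawn']:
--         return [pos]
--
--     i, j = pos[0], pos[1]
--     n, m = new_pos[0], new_pos[1]
--     func = lambda a, b: a + (1 if a < b else -1 if a > b else 0)
--     ans = []
--     while i != n or j != m:
--         ans.append([i, j])
--         i = func(i, n)
--         j = func(j, m)
--     return ans
-- ===== SOURCE B (Python) =====
-- def get_overlap_positions(pos, new_pos, piece=''):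
--     if piece in ['knight', 'pawn']:
--         return [pos]
--     i, j = pos[0], pos[1]
--     n, m = new_pos[0], new_pos[1]
--     di = (n > i) - (n < i)
--     dj = (m > j) - (m < j)
--     dist_i, dist_j = abs(n - i), abs(m - j)
--     steps = max(dist_i, dist_j)
--     return [[i + di * min(t, dist_i), j + dj * min(t, dist_j)] for t in range(steps)]
-- ===== Notes on version B (the rewrite author's own statement) =====
-- stated objective: alternative
-- what changed: Replaces A's incremental step-and-test while loop (repeatedly nudging each coordinate toward the target) with a count-first closed form: compute per-axis signs and distances once and build the path as a single comprehension over range(max distance) with per-axis clamped offsets.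
-- outside the precondition, e.g. on get_overlap_positions([1], [2, 3], 'rook'): A raises IndexError, B raises IndexError
import Mathlib
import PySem

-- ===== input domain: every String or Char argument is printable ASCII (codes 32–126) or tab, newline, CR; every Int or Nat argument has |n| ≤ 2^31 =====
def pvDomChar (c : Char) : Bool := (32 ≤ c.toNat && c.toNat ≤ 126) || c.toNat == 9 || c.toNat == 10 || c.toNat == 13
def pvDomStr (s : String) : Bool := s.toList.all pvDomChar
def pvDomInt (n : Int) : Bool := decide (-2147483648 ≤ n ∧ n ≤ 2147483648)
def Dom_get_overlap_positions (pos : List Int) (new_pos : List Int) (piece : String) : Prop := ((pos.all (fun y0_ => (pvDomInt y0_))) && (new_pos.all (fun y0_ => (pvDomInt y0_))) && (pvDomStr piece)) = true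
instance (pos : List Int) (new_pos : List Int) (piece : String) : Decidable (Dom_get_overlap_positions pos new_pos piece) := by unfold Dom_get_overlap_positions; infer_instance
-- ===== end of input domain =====

-- B replaces A's step-and-test while loop by a closed-form comprehension over range(max distance)
-- with per-axis clamped offsets; objective: alternative decomposition (same cost).

-- ===== PORT A =====
-- func = lambda a, b: a + (1 if a < b else -1 if a > b else 0)
def pvStep (a b : Int) : Int := a + (if a < b then 1 else if a > b then -1 else 0)

-- the while loop of A: while i != n or j != m: append [i,j]; i = func(i,n); j = func(j,m)
-- (fuel is a pure totality guard: the initial fuel below strictly exceeds the number of iterations)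
def pvLoopA (fuel : Nat) (i j n m : Int) : List (List Int) :=
  match fuel with
  | 0 => []
  | fuel + 1 =>
      if i ≠ n ∨ j ≠ m then
        [i, j] :: pvLoopA fuel (pvStep i n) (pvStep j m) n m
      else []

def get_overlap_positions (pos : List Int) (new_pos : List Int) (piece : String) : List (List Int) :=
  if piece == "knight" || piece == "pawn" then [pos]
  else
    -- pos[0], pos[1], new_pos[0], new_pos[1]: IndexError (none) is excluded by Pre_
    match PySem.List.pyGet? pos 0, PySem.List.pyGet? pos 1,
          PySem.List.pyGet? new_pos 0, PySem.List.pyGet? new_pos 1 with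
    | some i, some j, some n, some m =>
        pvLoopA ((n - i).natAbs + (m - j).natAbs + 1) i j n m
    | _, _, _, _ => []

-- ===== PORT B =====
def pvSign (x : Int) : Int := if 0 < x then 1 else if x < 0 then -1 else 0

def get_overlap_positions_alt (pos : List Int) (new_pos : List Int) (piece : String) : List (List Int) :=
  if piece == "knight" || piece == "pawn" then [pos]
  else
    (((PySem.List.pyGet? pos 0).bind fun i =>
       (PySem.List.pyGet? pos 1).bind fun j =>
       (PySem.List.pyGet? new_pos 0).bind fun n =>
       (PySem.List.pyGet? new_pos 1).map fun m =>
         let di := pvSign (n - i)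
         let dj := pvSign (m - j)
         let distI := (n - i).natAbs
         let distJ := (m - j).natAbs
         (List.range (max distI distJ)).map (fun t =>
           [i + di * (min t distI : Nat), j + dj * (min t distJ : Nat)])) : Option (List (List Int))).getD []

-- ===== PRECONDITION & SPEC =====
-- Pre_ excludes exactly the inputs where A raises IndexError: a non-knight/pawn call with pos or new_pos shorter than 2.
def Pre_get_overlap_positions (pos : List Int) (new_pos : List Int) (piece : String) : Prop :=
  piece = "knight" ∨ piece = "pawn" ∨ (2 ≤ pos.length ∧ 2 ≤ new_pos.length)
instance (pos : List Int) (new_pos : List Int) (piece : String) : Decidable (Pre_get_overlap_positions pos new_pos piece) := by unfold Pre_get_overlap_positions; infer_instance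

def pvWitness_get_overlap_positions : List Int × List Int × String := ([1, 2], [4, 0], "rook")

def Spec_get_overlap_positions (pos : List Int) (new_pos : List Int) (piece : String) (out : List (List Int)) : Prop := out = get_overlap_positions_alt pos new_pos piece
instance (pos : List Int) (new_pos : List Int) (piece : String) (out : List (List Int)) : Decidable (Spec_get_overlap_positions pos new_pos piece out) := by unfold Spec_get_overlap_positions; infer_instance

-- ===== CLAIM (what is proved, stated in full; the proofs are below) =====
def Claim_equal_get_overlap_positions : Prop := ∀ (pos : List Int) (new_pos : List Int) (piece : String), Dom_get_overlap_positions pos new_pos piece → Pre_get_overlap_positions pos new_pos piece → Spec_get_overlap_positions pos new_pos piece (get_overlap_positions pos new_pos piece)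

-- ===== LEMMAS AND PROOFS =====

-- per-coordinate: one A-step shifts the clamped closed-form offset by one
lemma pvStep_elem (a b : Int) (t : Nat) :
    pvStep a b + pvSign (b - pvStep a b) * (min t (b - pvStep a b).natAbs : Nat)
      = a + pvSign (b - a) * (min (t + 1) (b - a).natAbs : Nat) := by
  simp only [pvStep, pvSign]
  split_ifs <;> omega

lemma pvStep_dist (a b : Int) : (b - pvStep a b).natAbs = (b - a).natAbs - 1 := by
  simp only [pvStep]; split_ifs <;> omega

lemma pvLoop_eq_closed : ∀ (fuel : Nat) (i j n m : Int),
    (n - i).natAbs + (m - j).natAbs < fuel →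
    pvLoopA fuel i j n m = (List.range (max (n - i).natAbs (m - j).natAbs)).map (fun t =>
      [i + pvSign (n - i) * (min t (n - i).natAbs : Nat),
       j + pvSign (m - j) * (min t (m - j).natAbs : Nat)]) := by
  intro fuel
  induction fuel with
  | zero => intro i j n m h; omega
  | succ f ih =>
      intro i j n m h
      by_cases hne : i ≠ n ∨ j ≠ m
      · rw [pvLoopA, if_pos hne]
        have hdI := pvStep_dist i n
        have hdJ := pvStep_dist j m
        have hlt : (n - pvStep i n).natAbs + (m - pvStep j m).natAbs < f := by
          rcases hne with hne | hne <;> omega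
        rw [ih _ _ _ _ hlt]
        have hmax : max (n - i).natAbs (m - j).natAbs
            = max (n - pvStep i n).natAbs (m - pvStep j m).natAbs + 1 := by
          rcases hne with hne | hne <;> omega
        rw [hmax, List.range_succ_eq_map]
        simp only [List.map_cons, List.map_map]
        congr 1
        · simp
        · apply List.map_congr_left
          intro t _
          simp only [Function.comp]
          rw [pvStep_elem, pvStep_elem]
      · push Not at hne
        rw [pvLoopA, if_neg (by simp [hne.1, hne.2])]
        simp [hne.1, hne.2]

-- ===== VERDICT (by name: the statement is the Claim_ definition above) =====
theorem get_overlap_positions_spec : Claim_equal_get_overlap_positions := by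
  intro pos new_pos piece _ hpre
  unfold Spec_get_overlap_positions get_overlap_positions get_overlap_positions_alt
  by_cases hk : (piece == "knight" || piece == "pawn") = true
  · simp [hk]
  · rw [if_neg hk, if_neg hk]
    have hlen : 2 ≤ pos.length ∧ 2 ≤ new_pos.length := by
      rcases hpre with h | h | h
      · exact absurd (by simp [h]) hk
      · exact absurd (by simp [h]) hk
      · exact h
    obtain ⟨i, j, rest, hpos⟩ : ∃ i j rest, pos = i :: j :: rest := by
      match pos, hlen.1 with
      | a :: b :: r, _ => exact ⟨a, b, r, rfl⟩
    obtain ⟨n, m, rest', hnp⟩ : ∃ n m rest', new_pos = n :: m :: rest' := by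
      match new_pos, hlen.2 with
      | a :: b :: r, _ => exact ⟨a, b, r, rfl⟩
    subst hpos hnp
    rw [show PySem.List.pyGet? (i::j::rest) 0 = some i from by
          simp [PySem.List.pyGet?, PySem.List.pyIdx?, show (0:Int) ≤ (rest.length:Int)+1 from by positivity],
        show PySem.List.pyGet? (i::j::rest) 1 = some j from by
          simp [PySem.List.pyGet?, PySem.List.pyIdx?],
        show PySem.List.pyGet? (n::m::rest') 0 = some n from by
          simp [PySem.List.pyGet?, PySem.List.pyIdx?, show (0:Int) ≤ (rest'.length:Int)+1 from by positivity],
        show PySem.List.pyGet? (n::m::rest') 1 = some m from by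
          simp [PySem.List.pyGet?, PySem.List.pyIdx?]]
    exact pvLoop_eq_closed _ i j n m (by omega)
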